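-- pv_equiv track=rewrite | github.com/AvishmitaMandal/Applied-Algorithms | Assignment 08/Code.py | find_order_size
-- ===== SOURCE A (Python) =====
-- def find_order_size(orders):
--     hash_table = {}
--     result = len(orders)
--
--     for order in orders:
--         order_tuple = (order[0], order[1])
--         if order_tuple in hash_table:
--             hash_table[order_tuple] += 1
--         else:
--             hash_table[order_tuple] = 1
--
--     count = 0
--     for key, value in hash_table.items():
--         rev = (key[1], key[0])
--         if rev in hash_table:
--             if hash_table[key] >= hash_table[rev]:
--                 count += hash_table[key]
--             else:
--                 count += hash_table[rev]
--             hash_table[key] = 0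
--             hash_table[rev] = 0
--         else:
--             count += value
--
--     return count
-- ===== SOURCE B (Python) =====
-- def find_order_size(orders):
--     # one pass: bucket each order under its canonical sorted pair, keep (fwd, bwd) counts
--     buckets = {}
--     for order in orders:
--         a, b = order[0], order[1]
--         key = (a, b) if a <= b else (b, a)
--         fwd, bwd = buckets.get(key, (0, 0))
--         buckets[key] = (fwd + 1, bwd) if a <= b else (fwd, bwd + 1)
--     return sum(max(fwd, bwd) for fwd, bwd in buckets.values())
-- ===== Notes on version B (the rewrite author's own statement) =====
-- stated objective: alternative
-- what changed: B never pairs a key with its reverse: a single pass buckets each order under its canonical sorted pair, maintaining a (forward-count, backward-count) pair per bucket, and the result is the sum of max(fwd, bwd) over bucket values - no reverse lookups, no second membership-testing pass, no zeroing of dict entries.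
import Mathlib
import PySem

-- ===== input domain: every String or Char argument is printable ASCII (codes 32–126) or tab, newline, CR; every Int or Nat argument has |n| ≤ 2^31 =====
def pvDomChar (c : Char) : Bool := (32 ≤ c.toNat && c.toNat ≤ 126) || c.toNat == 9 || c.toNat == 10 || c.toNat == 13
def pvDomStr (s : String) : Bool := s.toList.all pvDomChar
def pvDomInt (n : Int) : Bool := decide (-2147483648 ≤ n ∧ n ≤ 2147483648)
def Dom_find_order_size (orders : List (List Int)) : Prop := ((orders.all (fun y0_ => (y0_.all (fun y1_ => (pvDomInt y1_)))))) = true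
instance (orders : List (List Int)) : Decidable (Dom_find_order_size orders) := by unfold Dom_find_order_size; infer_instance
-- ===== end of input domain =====

-- B replaces A's key-per-orientation dict and mirror-pairing second pass (reverse lookups,
-- max, zeroing) by one pass bucketing orders under the canonical sorted pair with
-- (forward, backward) counts, then summing max(fwd, bwd) over bucket values (alternative,
-- not claimed faster).


-- ===== PORT A =====
-- order[0], order[1]: Python raises IndexError when an order has fewer than 2 elements;
-- Pre_ excludes those inputs, so the `.getD 0` default is never reached under Pre_.
def pvKeyA (order : List Int) : Int × Int :=
  ((PySem.List.pyGet? order 0).getD 0, (PySem.List.pyGet? order 1).getD 0)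

-- the body of A's second `for key, value in hash_table.items()` loop; `kv.2` (the snapshot
-- value) is used only in the else branch, where the entry was never overwritten, so it
-- equals the value CPython's lazy items() view yields there.
def pvStepA (st : PySem.Dict (Int × Int) Int × Int) (kv : (Int × Int) × Int) :
    PySem.Dict (Int × Int) Int × Int :=
  let t := st.1
  let count := st.2
  let key := kv.1
  let rev := (key.2, key.1)
  if t.contains rev then
    let count :=
      if t.getD key 0 ≥ t.getD rev 0 then count + t.getD key 0 else count + t.getD rev 0
    ((t.insert key 0).insert rev 0, count)
  else
    (t, count + kv.2)

def find_order_size (orders : List (List Int)) : Int :=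
  let hash_table : PySem.Dict (Int × Int) Int :=
    orders.foldl (fun ht order =>
      let ot := pvKeyA order
      if ht.contains ot then ht.insert ot (ht.getD ot 0 + 1) else ht.insert ot 1)
      PySem.Dict.empty
  (hash_table.items.foldl pvStepA (hash_table, 0)).2

-- ===== PORT B =====
def find_order_size_alt (orders : List (List Int)) : Int :=
  let buckets : PySem.Dict (Int × Int) (Int × Int) :=
    orders.foldl (fun d order =>
      let a := (PySem.List.pyGet? order 0).getD 0
      let b := (PySem.List.pyGet? order 1).getD 0
      if a ≤ b then
        let p := d.getD (a, b) (0, 0)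
        d.insert (a, b) (p.1 + 1, p.2)
      else
        let p := d.getD (b, a) (0, 0)
        d.insert (b, a) (p.1, p.2 + 1)) PySem.Dict.empty
  (buckets.values.map (fun p => max p.1 p.2)).sum

-- ===== PRECONDITION & SPEC =====
-- Pre_ excludes exactly the inputs on which the Python A raises IndexError on order[0]/order[1].
def Pre_find_order_size (orders : List (List Int)) : Prop := ∀ o ∈ orders, 2 ≤ o.length
instance (orders : List (List Int)) : Decidable (Pre_find_order_size orders) := by
  unfold Pre_find_order_size; infer_instance

def pvWitness_find_order_size : List (List Int) := [[1, 2], [2, 1], [2, 1], [3, 3], [4, 5]]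

def Spec_find_order_size (orders : List (List Int)) (out : Int) : Prop :=
  out = find_order_size_alt orders
instance (orders : List (List Int)) (out : Int) : Decidable (Spec_find_order_size orders out) := by
  unfold Spec_find_order_size; infer_instance

-- ===== CLAIM (what is proved, stated in full; the proofs are below) =====
def Claim_equal_find_order_size : Prop :=
  ∀ (orders : List (List Int)), Dom_find_order_size orders → Pre_find_order_size orders →
    Spec_find_order_size orders (find_order_size orders)

-- ===== LEMMAS AND PROOFS =====

def pvRev (k : Int × Int) : Int × Int := (k.2, k.1)
def pvCanon (k : Int × Int) : Int × Int := if k.1 ≤ k.2 then k else (k.2, k.1)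
def pvBump (k : Int × Int) (p : Int × Int) : Int × Int :=
  if k.1 ≤ k.2 then (p.1 + 1, p.2) else (p.1, p.2 + 1)
def pvStepB (d : PySem.Dict (Int × Int) (Int × Int)) (k : Int × Int) :
    PySem.Dict (Int × Int) (Int × Int) :=
  if k.1 ≤ k.2 then
    let p := d.getD (k.1, k.2) (0, 0)
    d.insert (k.1, k.2) (p.1 + 1, p.2)
  else
    let p := d.getD (k.2, k.1) (0, 0)
    d.insert (k.2, k.1) (p.1, p.2 + 1)

-- A-side weight: what A contributes at key k of the first dict, given the counts c
def pvM (ps : List (Int × Int)) (k : Int × Int) : Int :=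
  if k.1 > k.2 ∧ pvRev k ∈ ps then min (ps.count k : Int) (ps.count (pvRev k) : Int) else 0

def pvW (c : Int × Int → Int) (p m : List (Int × Int)) (k : Int × Int) : Int :=
  (if pvRev k ∈ p then 0 else c k) -
    (if k.1 > k.2 ∧ pvRev k ∈ m then min (c k) (c (pvRev k)) else 0)

def pvTsum (c : Int × Int → Int) (p : List (Int × Int)) (s : List ((Int × Int) × Int)) : Int :=
  (s.map (fun kv => pvW c p (s.map (·.1)) kv.1)).sum
lemma pvRev_rev (k : Int × Int) : pvRev (pvRev k) = k := rfl
lemma pv_sum_map_congr {β : Type} (s : List β) (f g : β → Int)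
    (h : ∀ b ∈ s, f b = g b) : (s.map f).sum = (s.map g).sum := by
  rw [List.map_congr_left h]
lemma pv_sum_map_single {β κ : Type} [DecidableEq κ] (s : List β) (key : β → κ)
    (hnd : (s.map key).Nodup) (r : κ) (f g : β → Int) (δ : Int)
    (hfg : ∀ b ∈ s, key b ≠ r → f b = g b)
    (hδ : ∀ b ∈ s, key b = r → f b = g b + δ)
    (hr : r ∈ s.map key) :
    (s.map f).sum = (s.map g).sum + δ := by
  induction s with
  | nil => simp at hr
  | cons b s ih =>
    simp only [List.map_cons, List.nodup_cons, List.mem_map] at hnd hr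
    by_cases hb : key b = r
    · have hrest : ∀ b' ∈ s, f b' = g b' := by
        intro b' hb'
        exact hfg b' (List.mem_cons_of_mem _ hb') (fun h => hnd.1 ⟨b', hb', h.trans hb.symm⟩)
      simp only [List.map_cons, List.sum_cons]
      rw [hδ b (List.mem_cons_self) hb, List.map_congr_left hrest]
      ring
    · have hr' : r ∈ s.map key := by
        rcases List.mem_cons.1 hr with hb' | hb'
        · exact absurd hb'.symm hb
        · exact hb'
      have := ih hnd.2 (fun b' h hne => hfg b' (List.mem_cons_of_mem _ h) hne)
        (fun b' h he => hδ b' (List.mem_cons_of_mem _ h) he) hr'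
      simp only [List.map_cons, List.sum_cons, this,
        hfg b List.mem_cons_self hb]
      ring
lemma pvLoopA (c : Int × Int → Int) :
    ∀ (s : List ((Int × Int) × Int)) (p ks : List (Int × Int))
      (t : PySem.Dict (Int × Int) Int) (acc : Int),
      ks = p ++ s.map (·.1) → ks.Nodup →
      (∀ x, t.contains x = decide (x ∈ ks)) →
      (∀ kv ∈ s, kv.2 = c kv.1) →
      (∀ kv ∈ s, t.getD kv.1 0 = if pvRev kv.1 ∈ p then 0 else c kv.1) →
      (∀ kv ∈ s, pvRev kv.1 ∈ p → t.getD (pvRev kv.1) 0 = 0) →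
      (s.foldl pvStepA (t, acc)).2 = acc + pvTsum c p s := by
  intro s
  induction s with
  | nil => intro p ks t acc _ _ _ _ _ _; simp [pvTsum]
  | cons kv s' ih =>
    intro p ks t acc hks hnd hcont hval H1 H2
    obtain ⟨k, v⟩ := kv
    -- basic structure facts
    have hndpk : (p ++ k :: s'.map (·.1)).Nodup := by
      have h := hnd; rw [hks, List.map_cons] at h; exact h
    have hknp : k ∉ p := by
      intro h
      exact (List.disjoint_of_nodup_append hndpk) h List.mem_cons_self
    have hknm' : k ∉ s'.map (·.1) := by
      have := (List.nodup_append.1 hndpk).2.1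
      exact (List.nodup_cons.1 this).1
    have hm'nd : (s'.map (·.1)).Nodup := by
      have := (List.nodup_append.1 hndpk).2.1
      exact (List.nodup_cons.1 this).2
    have hm'np : ∀ x ∈ s'.map (·.1), x ∉ p := by
      intro x hx hxp
      exact (List.disjoint_of_nodup_append hndpk) hxp (List.mem_cons_of_mem _ hx)
    have hkks : k ∈ ks := by
      rw [hks]; simp
    have hpks : ∀ x ∈ p, x ∈ ks := by
      intro x hx; rw [hks]; exact List.mem_append_left _ hx
    have hm'ks : ∀ x ∈ s'.map (·.1), x ∈ ks := by
      intro x hx; rw [hks]; simp [hx]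
    have hks' : ks = (p ++ [k]) ++ s'.map (·.1) := by
      rw [hks]; simp
    have hTsum : pvTsum c p ((k, v) :: s') =
        pvW c p (k :: s'.map (·.1)) k +
          (s'.map (fun kv => pvW c p (k :: s'.map (·.1)) kv.1)).sum := by
      simp [pvTsum]
    -- congruence move for the tail sum when no key of s' equals pvRev k
    have hcongr : (∀ kv' ∈ s', kv'.1 ≠ pvRev k) →
        (s'.map (fun kv => pvW c p (k :: s'.map (·.1)) kv.1)).sum = pvTsum c (p ++ [k]) s' := by
      intro hne
      unfold pvTsum
      apply pv_sum_map_congr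
      intro kv' hkv'
      have h1 : pvRev kv'.1 ≠ k := fun h => hne kv' hkv' (by
        have := congrArg pvRev h; rwa [pvRev_rev] at this)
      have h2 : (pvRev kv'.1 ∈ k :: s'.map (·.1)) ↔ (pvRev kv'.1 ∈ s'.map (·.1)) := by
        simp [List.mem_cons, h1]
      have h3 : (pvRev kv'.1 ∈ p ++ [k]) ↔ (pvRev kv'.1 ∈ p) := by
        simp [List.mem_append, h1]
      simp only [pvW, h2, h3]
    have hvv : v = c k := hval (k, v) List.mem_cons_self
    rw [List.foldl_cons]
    by_cases hrk : pvRev k ∈ ks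
    · -- rev key present in the dict
      have hA : pvStepA (t, acc) (k, v) = ((t.insert k 0).insert (pvRev k) 0,
          if t.getD k 0 ≥ t.getD (pvRev k) 0 then acc + t.getD k 0 else acc + t.getD (pvRev k) 0) := by
        have hc : t.contains (k.2, k.1) = true := by
          rw [hcont]; exact decide_eq_true hrk
        simp [pvStepA, hc, pvRev]
      rw [hA]
      have hgetD' : ∀ x, ((t.insert k 0).insert (pvRev k) 0).getD x 0 =
          if x = pvRev k then 0 else if x = k then 0 else t.getD x 0 := by
        intro x
        rw [PySem.Dict.getD_insert, PySem.Dict.getD_insert]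
      have hcont' : ∀ x, ((t.insert k 0).insert (pvRev k) 0).contains x = decide (x ∈ ks) := by
        intro x
        rw [PySem.Dict.contains_insert, PySem.Dict.contains_insert, hcont]
        by_cases h1 : x = pvRev k
        · subst h1; simp [hrk]
        · by_cases h2 : x = k
          · subst h2; simp [hkks]
          · have e1 : (x == pvRev k) = false := beq_eq_false_iff_ne.mpr h1
            have e2 : (x == k) = false := beq_eq_false_iff_ne.mpr h2
            rw [e1, e2]; simp
      have hval' : ∀ kv' ∈ s', kv'.2 = c kv'.1 :=
        fun kv' h => hval kv' (List.mem_cons_of_mem _ h)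
      have hH1' : ∀ kv' ∈ s', ((t.insert k 0).insert (pvRev k) 0).getD kv'.1 0 =
          if pvRev kv'.1 ∈ p ++ [k] then 0 else c kv'.1 := by
        intro kv' hkv'
        rw [hgetD']
        by_cases hc1 : kv'.1 = pvRev k
        · have hthis : pvRev kv'.1 = k := by rw [hc1, pvRev_rev]
          rw [if_pos hc1, hthis]
          simp [List.mem_append]
        · have hc2 : kv'.1 ≠ k := by
            intro h; exact hknm' (h ▸ List.mem_map_of_mem hkv')
          have hc3 : pvRev kv'.1 ≠ k := fun h => hc1 (by
            have := congrArg pvRev h; rwa [pvRev_rev] at this)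
          rw [if_neg hc1, if_neg hc2, H1 kv' (List.mem_cons_of_mem _ hkv')]
          have : (pvRev kv'.1 ∈ p ++ [k]) ↔ (pvRev kv'.1 ∈ p) := by
            simp [List.mem_append, hc3]
          simp only [this]
      have hH2' : ∀ kv' ∈ s', pvRev kv'.1 ∈ p ++ [k] →
          ((t.insert k 0).insert (pvRev k) 0).getD (pvRev kv'.1) 0 = 0 := by
        intro kv' hkv' hp
        rw [hgetD']
        by_cases hc1 : pvRev kv'.1 = pvRev k
        · simp [hc1]
        · by_cases hc2 : pvRev kv'.1 = k
          · simp [hc2]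
          · rw [if_neg hc1, if_neg hc2]
            rcases List.mem_append.1 hp with hp | hp
            · exact H2 kv' (List.mem_cons_of_mem _ hkv') hp
            · exact absurd (List.mem_singleton.1 hp) hc2
      have hgk : t.getD k 0 = if pvRev k ∈ p then 0 else c k :=
        H1 (k, v) List.mem_cons_self
      have hloc : pvRev k ∈ p ∨ pvRev k = k ∨ pvRev k ∈ s'.map (·.1) := by
        have h := hrk; rw [hks, List.map_cons] at h
        rcases List.mem_append.1 h with h | h
        · exact Or.inl h
        · rcases List.mem_cons.1 h with h | h
          · exact Or.inr (Or.inl h)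
          · exact Or.inr (Or.inr h)
      rcases hloc with hY1 | hY2 | hY3
      · -- pvRev k already processed: both entries are 0, nothing is added
        have hrkne : pvRev k ≠ k := fun h => hknp (h ▸ hY1)
        have hgk0 : t.getD k 0 = 0 := by rw [hgk, if_pos hY1]
        have hgr0 : t.getD (pvRev k) 0 = 0 := H2 (k, v) List.mem_cons_self hY1
        have hne : ∀ kv' ∈ s', kv'.1 ≠ pvRev k := by
          intro kv' hkv' h
          exact hm'np kv'.1 (List.mem_map_of_mem hkv') (h ▸ hY1)
        rw [ih (p ++ [k]) ks _ _ hks' hnd hcont' hval' hH1' hH2']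
        rw [hTsum, hcongr hne, hgk0, hgr0]
        have hWk : pvW c p (k :: s'.map (·.1)) k = 0 := by
          have h2 : pvRev k ∉ k :: s'.map (·.1) := by
            intro h
            rcases List.mem_cons.1 h with h | h
            · exact hrkne h
            · exact hm'np _ h hY1
          simp [pvW, hY1, h2]
        rw [hWk]
        simp
      · -- symmetric key (a, a): adds its own count, zeroes itself
        have h12 : k.1 = k.2 := by
          have := congrArg Prod.snd hY2
          simpa [pvRev] using this
        have hrknp : pvRev k ∉ p := fun h => hknp (hY2 ▸ h)
        have hgkc : t.getD k 0 = c k := by rw [hgk, if_neg hrknp]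
        have hne : ∀ kv' ∈ s', kv'.1 ≠ pvRev k := by
          intro kv' hkv' h
          exact hknm' (hY2 ▸ h ▸ List.mem_map_of_mem hkv')
        rw [ih (p ++ [k]) ks _ _ hks' hnd hcont' hval' hH1' hH2']
        rw [hTsum, hcongr hne]
        have hWk : pvW c p (k :: s'.map (·.1)) k = c k := by
          have hgt : ¬ k.1 > k.2 := by omega
          simp [pvW, hrknp, hgt]
        rw [hWk, hY2, hgkc]
        simp
        ring
      · -- mirrored pair, partner still unprocessed: adds max, zeroes both
        have hrkne : pvRev k ≠ k := fun h => hknm' (h ▸ hY3)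
        have hrknp : pvRev k ∉ p := fun h => hm'np _ hY3 h
        have h12 : k.1 ≠ k.2 := by
          intro h
          exact hrkne (by simp [pvRev, Prod.ext_iff, h])
        have hgkc : t.getD k 0 = c k := by rw [hgk, if_neg hrknp]
        obtain ⟨kv'', hkv''mem, hkv''fst⟩ := List.mem_map.1 hY3
        have hgrc : t.getD (pvRev k) 0 = c (pvRev k) := by
          have h := H1 kv'' (List.mem_cons_of_mem _ hkv''mem)
          rw [hkv''fst] at h
          rwa [if_neg (by rw [pvRev_rev]; exact hknp)] at h
        rw [ih (p ++ [k]) ks _ _ hks' hnd hcont' hval' hH1' hH2']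
        have htail : (s'.map (fun kv => pvW c p (k :: s'.map (·.1)) kv.1)).sum =
            pvTsum c (p ++ [k]) s' +
              (c (pvRev k) - if k.2 > k.1 then min (c (pvRev k)) (c k) else 0) := by
          unfold pvTsum
          apply pv_sum_map_single s' (·.1) hm'nd (pvRev k)
          · intro kv' hkv' hne1
            have h1 : pvRev kv'.1 ≠ k := fun h => hne1 (by
              have := congrArg pvRev h; rwa [pvRev_rev] at this)
            have h2 : (pvRev kv'.1 ∈ k :: s'.map (·.1)) ↔ (pvRev kv'.1 ∈ s'.map (·.1)) := by
              simp [List.mem_cons, h1]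
            have h3 : (pvRev kv'.1 ∈ p ++ [k]) ↔ (pvRev kv'.1 ∈ p) := by
              simp [List.mem_append, h1]
            simp only [pvW, h2, h3]
          · intro kv' hkv' he
            rw [he]
            have hrr : pvRev (pvRev k) = k := pvRev_rev k
            have hkpk : k ∈ p ++ [k] := by simp
            have hknm'' : k ∉ s'.map (·.1) := hknm'
            have hrev1 : (pvRev k).1 = k.2 := rfl
            have hrev2 : (pvRev k).2 = k.1 := rfl
            simp only [pvW, hrr, hrev1, hrev2, if_neg hknp, if_pos hkpk,
              List.mem_cons]
            have hc1 : (k = k ∨ k ∈ s'.map (·.1)) ↔ True := by simp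
            have hc2 : (k ∈ s'.map (·.1)) ↔ False := by simp [hknm'']
            simp only [hc2, and_false, if_neg (not_false)]
            by_cases h21 : k.2 > k.1 <;> simp [h21]
          · exact hY3
        rw [hTsum, htail]
        have hWk : pvW c p (k :: s'.map (·.1)) k =
            c k - (if k.1 > k.2 then min (c k) (c (pvRev k)) else 0) := by
          have h2 : pvRev k ∈ k :: s'.map (·.1) := List.mem_cons_of_mem _ hY3
          simp [pvW, hrknp, h2]
        rw [hWk, hgkc, hgrc]
        by_cases hgt : k.1 > k.2
        · have hlt : ¬ k.2 > k.1 := by omega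
          simp only [if_pos hgt, if_neg hlt]
          rcases Int.lt_or_le (c k) (c (pvRev k)) with hlt2 | hle
          · rw [if_neg (not_le.mpr hlt2), min_eq_left hlt2.le]; ring
          · rw [if_pos hle, min_eq_right hle]; ring
        · have hlt : k.2 > k.1 := by omega
          simp only [if_neg hgt, if_pos hlt]
          rcases Int.lt_or_le (c k) (c (pvRev k)) with hlt2 | hle
          · rw [if_neg (not_le.mpr hlt2), min_eq_right hlt2.le]; ring
          · rw [if_pos hle, min_eq_left hle]; ring
    · -- rev key absent
      have hA : pvStepA (t, acc) (k, v) = (t, acc + v) := by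
        have hc : t.contains (k.2, k.1) = false := by
          rw [hcont]; exact decide_eq_false hrk
        simp [pvStepA, hc]
      rw [hA]
      have hne : ∀ kv' ∈ s', kv'.1 ≠ pvRev k := by
        intro kv' hkv' h
        exact hrk (h ▸ hm'ks kv'.1 (List.mem_map_of_mem hkv'))
      have ihres := ih (p ++ [k]) ks t (acc + v) hks' hnd hcont
        (fun kv' h => hval kv' (List.mem_cons_of_mem _ h))
        (by
          intro kv' hkv'
          have h1 : pvRev kv'.1 ≠ k := fun h => hne kv' hkv' (by
            have := congrArg pvRev h; rwa [pvRev_rev] at this)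
          rw [H1 kv' (List.mem_cons_of_mem _ hkv')]
          simp [List.mem_append, h1])
        (by
          intro kv' hkv' hp
          rcases List.mem_append.1 hp with hp | hp
          · exact H2 kv' (List.mem_cons_of_mem _ hkv') hp
          · exact absurd (List.mem_singleton.1 hp) (fun h => hne kv' hkv' (by
              have := congrArg pvRev h; rwa [pvRev_rev] at this)))
      rw [ihres, hTsum, hcongr hne, hvv]
      have hWk : pvW c p (k :: s'.map (·.1)) k = c k := by
        have h1 : pvRev k ∉ p := fun h => hrk (hpks _ h)
        have h2 : pvRev k ∉ k :: s'.map (·.1) := by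
          intro h
          rcases List.mem_cons.1 h with h | h
          · exact hrk (h ▸ hkks)
          · exact hrk (hm'ks _ h)
        simp [pvW, h1, h2]
      rw [hWk]; ring
lemma pv_buildA (orders : List (List Int)) :
    orders.foldl (fun ht order =>
      let ot := pvKeyA order
      if ht.contains ot then ht.insert ot (ht.getD ot 0 + 1) else ht.insert ot 1)
      (PySem.Dict.empty : PySem.Dict (Int × Int) Int)
      = PySem.Dict.counter (orders.map pvKeyA) := by
  have h : (fun (ht : PySem.Dict (Int × Int) Int) (order : List Int) =>
      let ot := pvKeyA order
      if ht.contains ot then ht.insert ot (ht.getD ot 0 + 1) else ht.insert ot 1)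
      = fun ht order => ht.insert (pvKeyA order) (ht.getD (pvKeyA order) 0 + 1) := by
    funext ht order
    by_cases hc : ht.contains (pvKeyA order)
    · simp [hc]
    · have hc' : ht.contains (pvKeyA order) = false := by simpa using hc
      rw [if_neg hc, PySem.Dict.getD_of_not_contains ht 0 hc']
      norm_num
  rw [← PySem.Dict.foldl_insert_getD_add_one_eq_counter, List.foldl_map, h]

lemma pv_sum_indicator (x : Int × Int) :
    ∀ S : List (Int × Int), S.Nodup → x ∈ S →
      (S.map (fun k => if x == k then 1 else 0)).sum = (1 : Nat) := by
  intro S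
  induction S with
  | nil => intro _ h; simp at h
  | cons y S ih =>
    intro hnd hx
    by_cases h : x = y
    · subst h
      have hx0 : x ∉ S := (List.nodup_cons.1 hnd).1
      have hz : ∀ k ∈ S, (if x == k then (1 : Nat) else 0) = 0 := by
        intro k hk
        have hne : x ≠ k := fun he => hx0 (he ▸ hk)
        simp [hne]
      rw [List.map_cons, List.sum_cons, List.map_congr_left hz]
      simp
    · have hx' : x ∈ S := by
        rcases List.mem_cons.1 hx with h' | h'
        · exact absurd h' h
        · exact h'
      rw [List.map_cons, List.sum_cons, ih (List.nodup_cons.1 hnd).2 hx']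
      have hb : ¬ (x == y) = true := by simp [h]
      simp [hb]

lemma pv_sum_count (S : List (Int × Int)) (hnd : S.Nodup) :
    ∀ ps : List (Int × Int), (∀ x ∈ ps, x ∈ S) →
      (S.map (fun k => ps.count k)).sum = ps.length := by
  intro ps
  induction ps with
  | nil => intro _; simp
  | cons x ps ih =>
    intro hmem
    have hx : x ∈ S := hmem x List.mem_cons_self
    have hsplit : ∀ k, (x :: ps).count k = ps.count k + (if x == k then 1 else 0) := by
      intro k; rw [List.count_cons]
    have : (S.map (fun k => (x :: ps).count k)).sum
        = (S.map (fun k => ps.count k)).sum + (S.map (fun k => if x == k then 1 else 0)).sum := by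
      simp only [hsplit]
      induction S with
      | nil => simp
      | cons z S ihS => simp at ihS ⊢; omega
    rw [this, ih (fun y hy => hmem y (List.mem_cons_of_mem _ hy)),
      pv_sum_indicator x S hnd hx]
    simp
lemma pv_sum_map_sub {β : Type} (l : List β) (f g : β → Int) :
    (l.map (fun x => f x - g x)).sum = (l.map f).sum - (l.map g).sum := by
  induction l with
  | nil => simp
  | cons x l ih => simp only [List.map_cons, List.sum_cons, ih]; ring

-- A's result in closed form: total length minus the min-count of each mirrored pair,
-- charged at the key whose first component is larger.
lemma pvA_char (orders : List (List Int)) :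
    find_order_size orders =
      (orders.length : Int) -
        ((PySem.Set.ofList (orders.map pvKeyA)).map
          (fun k => pvM (orders.map pvKeyA) k)).sum := by
  simp only [find_order_size]
  rw [pv_buildA]
  set ps := orders.map pvKeyA with hps
  set d := PySem.Dict.counter ps with hd
  set ks0 := PySem.Set.ofList ps with hks0
  set c : Int × Int → Int := fun k => (ps.count k : Int) with hc
  have hitems : d.items = ks0.map (fun k => (k, c k)) := by
    rw [hd, PySem.Dict.items_counter]
  have hmapfst : d.items.map (·.1) = ks0 := by
    rw [hitems, List.map_map]
    show ks0.map (fun k => k) = ks0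
    exact List.map_id' ks0
  have hnd : ks0.Nodup := PySem.Set.nodup_ofList ps
  have hcont : ∀ x, d.contains x = decide (x ∈ ks0) := by
    intro x
    rw [PySem.Dict.contains_eq_decide_mem_keys, hd, PySem.Dict.keys_counter]
  have hgetD : ∀ x, d.getD x 0 = c x := by
    intro x; rw [hd, PySem.Dict.getD_counter]
  have hval : ∀ kv ∈ d.items, kv.2 = c kv.1 := by
    intro kv hkv
    rw [hitems] at hkv
    rcases List.mem_map.1 hkv with ⟨k, _, rfl⟩
    rfl
  have hA := pvLoopA c d.items [] ks0 d 0
    (by rw [List.nil_append]; exact hmapfst.symm) hnd hcont hval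
    (by
      intro kv hkv
      rw [if_neg (List.not_mem_nil), hgetD kv.1])
    (by intro kv _ h; exact absurd h List.not_mem_nil)
  rw [hA]
  have hTs : pvTsum c [] d.items = (ks0.map (fun k => c k - pvM ps k)).sum := by
    unfold pvTsum
    rw [hmapfst, hitems, List.map_map]
    apply pv_sum_map_congr
    intro k _
    have hmem : (pvRev k ∈ ks0) ↔ (pvRev k ∈ ps) := PySem.Set.mem_ofList ps (pvRev k)
    simp only [Function.comp, pvW, pvM, List.not_mem_nil, if_false, hmem]
    rfl
  rw [hTs, pv_sum_map_sub]
  have hsumc : (ks0.map (fun k => c k)).sum = (orders.length : Int) := by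
    have hsum_nat : (ks0.map (fun k => ps.count k)).sum = ps.length :=
      pv_sum_count ks0 hnd ps (fun x hx => (PySem.Set.mem_ofList ps x).2 hx)
    calc (ks0.map (fun k => c k)).sum
        = ((ks0.map (fun k => ps.count k)).map (fun n : Nat => (n : Int))).sum := by
          rw [List.map_map]; rfl
      _ = (((ks0.map (fun k => ps.count k)).sum : Nat) : Int) :=
          (Nat.cast_list_sum _).symm
      _ = (orders.length : Int) := by rw [hsum_nat, hps, List.length_map]
  rw [hsumc]
  ring

-- B-side: canonical facts
lemma pvCanon_fst_le (k : Int × Int) : (pvCanon k).1 ≤ (pvCanon k).2 := by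
  unfold pvCanon; split_ifs with h
  · exact h
  · simp; omega

lemma pvCanon_eq_iff (q k : Int × Int) (hq : q.1 ≤ q.2) :
    pvCanon k = q ↔ k = q ∨ (q.1 < q.2 ∧ k = pvRev q) := by
  unfold pvCanon pvRev
  split_ifs with h
  · constructor
    · intro he; exact Or.inl he
    · rintro (rfl | ⟨hlt, rfl⟩)
      · rfl
      · simp at h; omega
  · constructor
    · intro he
      right
      refine ⟨?_, ?_⟩
      · rw [← he]; simp; omega
      · rw [← he]
    · rintro (rfl | ⟨hlt, rfl⟩)
      · omega
      · rfl

lemma pvStepB_eq (d : PySem.Dict (Int × Int) (Int × Int)) (k : Int × Int) :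
    pvStepB d k = d.insert (pvCanon k) (pvBump k (d.getD (pvCanon k) (0, 0))) := by
  unfold pvStepB pvCanon pvBump
  split_ifs with h <;> rfl

-- getD of the bucket fold: forward / backward counts as countP's
lemma pvTally_getD :
    ∀ (l : List (Int × Int)) (d : PySem.Dict (Int × Int) (Int × Int)) (q : Int × Int),
      (l.foldl pvStepB d).getD q (0, 0) =
        ((d.getD q (0, 0)).1 + (l.countP (fun k => decide (pvCanon k = q ∧ k.1 ≤ k.2)) : Int),
         (d.getD q (0, 0)).2 + (l.countP (fun k => decide (pvCanon k = q ∧ ¬ k.1 ≤ k.2)) : Int)) := by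
  intro l
  induction l with
  | nil => intro d q; simp
  | cons k l ih =>
    intro d q
    rw [List.foldl_cons, ih (pvStepB d k) q, pvStepB_eq, PySem.Dict.getD_insert,
      List.countP_cons, List.countP_cons]
    by_cases hq : q = pvCanon k
    · rw [if_pos hq]
      by_cases hle : k.1 ≤ k.2
      · have h1 : (decide (pvCanon k = q ∧ k.1 ≤ k.2)) = true := by
          simp [hq.symm, hle]
        have h2 : (decide (pvCanon k = q ∧ ¬ k.1 ≤ k.2)) = false := by
          simp [hle]
        rw [h1, h2, hq]
        simp only [pvBump, if_pos hle, Prod.mk.injEq]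
        simp
        omega
      · have h1 : (decide (pvCanon k = q ∧ k.1 ≤ k.2)) = false := by
          simp [hle]
        have h2 : (decide (pvCanon k = q ∧ ¬ k.1 ≤ k.2)) = true := by
          simp [hq.symm, hle]
        rw [h1, h2, hq]
        simp only [pvBump, if_neg hle, Prod.mk.injEq]
        simp
        omega
    · rw [if_neg hq]
      have hne : pvCanon k ≠ q := fun h => hq h.symm
      have h1 : (decide (pvCanon k = q ∧ k.1 ≤ k.2)) = false := by simp [hne]
      have h2 : (decide (pvCanon k = q ∧ ¬ k.1 ≤ k.2)) = false := by simp [hne]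
      rw [h1, h2]
      simp

lemma pvTally_keys (l : List (Int × Int)) :
    (l.foldl pvStepB PySem.Dict.empty).keys = PySem.Set.ofList (l.map pvCanon) := by
  have hfe : pvStepB =
      fun d k => d.insert (pvCanon k) (pvBump k (d.getD (pvCanon k) (0, 0))) :=
    funext fun d => funext fun k => pvStepB_eq d k
  rw [hfe, PySem.Dict.keys_foldl_insert_key l pvCanon
    (fun d k => pvBump k (d.getD (pvCanon k) (0, 0))) PySem.Dict.empty]
  rfl

lemma pvTally_nodup (l : List (Int × Int)) :
    (l.foldl pvStepB PySem.Dict.empty).keys.Nodup := by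
  have hfe : pvStepB =
      fun d k => d.insert (pvCanon k) (pvBump k (d.getD (pvCanon k) (0, 0))) :=
    funext fun d => funext fun k => pvStepB_eq d k
  rw [hfe]
  exact PySem.Dict.nodup_keys_foldl_insert_key l pvCanon
    (fun d k => pvBump k (d.getD (pvCanon k) (0, 0))) PySem.Dict.empty
    PySem.Dict.nodup_keys_empty

-- the bridge between the two closed forms
lemma pv_sums_eq (ps : List (Int × Int)) :
    ((PySem.Set.ofList (ps.map pvCanon)).map
      (fun q => max (ps.count q : Int)
        (if q.1 < q.2 then (ps.count (pvRev q) : Int) else 0))).sum =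
    ((PySem.Set.ofList ps).map (fun k => (ps.count k : Int) - pvM ps k)).sum := by
  have hdsnd : (PySem.Set.ofList (ps.map pvCanon)).Nodup := PySem.Set.nodup_ofList _
  have hksnd : (PySem.Set.ofList ps).Nodup := PySem.Set.nodup_ofList _
  rw [← List.sum_toFinset _ hdsnd, ← List.sum_toFinset _ hksnd]
  have hKD : ∀ k ∈ (PySem.Set.ofList ps : List (Int × Int)).toFinset,
      pvCanon k ∈ (PySem.Set.ofList (ps.map pvCanon) : List (Int × Int)).toFinset := by
    intro k hk
    rw [List.mem_toFinset, PySem.Set.mem_ofList] at hk ⊢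
    exact List.mem_map_of_mem hk
  rw [← Finset.sum_fiberwise_of_maps_to hKD (fun k => (ps.count k : Int) - pvM ps k)]
  apply Finset.sum_congr rfl
  intro q hqD
  obtain ⟨k0, hk0ps, hk0⟩ : ∃ k0 ∈ ps, pvCanon k0 = q :=
    List.mem_map.1 ((PySem.Set.mem_ofList _ q).1 (List.mem_toFinset.1 hqD))
  have hq12 : q.1 ≤ q.2 := hk0 ▸ pvCanon_fst_le k0
  have hmemK : ∀ k : Int × Int,
      (k ∈ (PySem.Set.ofList ps : List (Int × Int)).toFinset) ↔ k ∈ ps := by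
    intro k; rw [List.mem_toFinset, PySem.Set.mem_ofList]
  by_cases hlt : q.1 < q.2
  · rw [if_pos hlt]
    have hne : q ≠ pvRev q := by
      intro h
      have h1 := congrArg Prod.fst h
      simp [pvRev] at h1
      omega
    by_cases hqK : q ∈ ps
    · by_cases hrK : pvRev q ∈ ps
      · have hfil : ((PySem.Set.ofList ps : List (Int × Int)).toFinset.filter
            (fun k => pvCanon k = q)) = {q, pvRev q} := by
          apply Finset.ext
          intro k
          rw [Finset.mem_filter, hmemK, pvCanon_eq_iff q k hq12,
            Finset.mem_insert, Finset.mem_singleton]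
          constructor
          · rintro ⟨_, rfl | ⟨_, rfl⟩⟩
            · exact Or.inl rfl
            · exact Or.inr rfl
          · rintro (rfl | rfl)
            · exact ⟨hqK, Or.inl rfl⟩
            · exact ⟨hrK, Or.inr ⟨hlt, rfl⟩⟩
        rw [hfil, Finset.sum_pair hne]
        have hMq : pvM ps q = 0 := by
          unfold pvM
          rw [if_neg]
          intro ⟨h1, _⟩; omega
        have hMr : pvM ps (pvRev q) =
            min (ps.count (pvRev q) : Int) (ps.count q : Int) := by
          unfold pvM
          rw [pvRev_rev, if_pos ⟨by simp [pvRev]; omega, hqK⟩]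
        rw [hMq, hMr]
        rcases le_total (ps.count q : Int) ((ps.count (pvRev q) : Int)) with h | h
        · rw [max_eq_right h, min_eq_right h]; ring
        · rw [max_eq_left h, min_eq_left h]; ring
      · have hfil : ((PySem.Set.ofList ps : List (Int × Int)).toFinset.filter
            (fun k => pvCanon k = q)) = {q} := by
          apply Finset.ext
          intro k
          rw [Finset.mem_filter, hmemK, pvCanon_eq_iff q k hq12, Finset.mem_singleton]
          constructor
          · rintro ⟨hkps, rfl | ⟨_, rfl⟩⟩
            · rfl
            · exact absurd hkps hrK
          · rintro rfl
            exact ⟨hqK, Or.inl rfl⟩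
        rw [hfil, Finset.sum_singleton]
        have hc0 : ps.count (pvRev q) = 0 := List.count_eq_zero.2 hrK
        have hMq : pvM ps q = 0 := by
          unfold pvM
          rw [if_neg]
          intro ⟨h1, _⟩; omega
        rw [hc0, hMq]
        simp
    · have hrK : pvRev q ∈ ps := by
        rcases (pvCanon_eq_iff q k0 hq12).1 hk0 with rfl | ⟨_, rfl⟩
        · exact absurd hk0ps hqK
        · exact hk0ps
      have hfil : ((PySem.Set.ofList ps : List (Int × Int)).toFinset.filter
          (fun k => pvCanon k = q)) = {pvRev q} := by
        apply Finset.ext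
        intro k
        rw [Finset.mem_filter, hmemK, pvCanon_eq_iff q k hq12, Finset.mem_singleton]
        constructor
        · rintro ⟨hkps, rfl | ⟨_, rfl⟩⟩
          · exact absurd hkps hqK
          · rfl
        · rintro rfl
          exact ⟨hrK, Or.inr ⟨hlt, rfl⟩⟩
      rw [hfil, Finset.sum_singleton]
      have hc0 : ps.count q = 0 := List.count_eq_zero.2 hqK
      have hMr : pvM ps (pvRev q) = 0 := by
        unfold pvM
        rw [pvRev_rev, if_neg]
        intro ⟨_, h2⟩; exact hqK h2
      rw [hc0, hMr]
      simp
  · rw [if_neg hlt]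
    have hq12' : q.1 = q.2 := by omega
    have hrq : pvRev q = q := by
      unfold pvRev
      exact Prod.ext (by omega) (by omega)
    have hqK : q ∈ ps := by
      rcases (pvCanon_eq_iff q k0 hq12).1 hk0 with rfl | ⟨h, _⟩
      · exact hk0ps
      · omega
    have hfil : ((PySem.Set.ofList ps : List (Int × Int)).toFinset.filter
        (fun k => pvCanon k = q)) = {q} := by
      apply Finset.ext
      intro k
      rw [Finset.mem_filter, hmemK, pvCanon_eq_iff q k hq12, Finset.mem_singleton]
      constructor
      · rintro ⟨hkps, rfl | ⟨h, _⟩⟩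
        · rfl
        · omega
      · rintro rfl
        exact ⟨hqK, Or.inl rfl⟩
    rw [hfil, Finset.sum_singleton]
    have hMq : pvM ps q = 0 := by
      unfold pvM
      rw [if_neg]
      intro ⟨h1, _⟩; omega
    rw [hMq]
    simp

lemma pv_countF (ps : List (Int × Int)) (q : Int × Int) (hq : q.1 ≤ q.2) :
    ps.countP (fun k => decide (pvCanon k = q ∧ k.1 ≤ k.2)) = ps.count q := by
  show ps.countP _ = ps.countP (· == q)
  apply List.countP_congr
  intro k _
  simp only [decide_eq_true_eq, beq_iff_eq]
  constructor
  · rintro ⟨hc, hle⟩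
    rw [pvCanon, if_pos hle] at hc
    exact hc
  · rintro rfl
    exact ⟨by rw [pvCanon, if_pos hq], hq⟩

lemma pv_countB (ps : List (Int × Int)) (q : Int × Int) (hq : q.1 ≤ q.2) :
    ((ps.countP (fun k => decide (pvCanon k = q ∧ ¬ k.1 ≤ k.2)) : Int)) =
      if q.1 < q.2 then (ps.count (pvRev q) : Int) else 0 := by
  by_cases hlt : q.1 < q.2
  · rw [if_pos hlt]
    congr 1
    show ps.countP _ = ps.countP (· == pvRev q)
    apply List.countP_congr
    intro k _
    simp only [decide_eq_true_eq, beq_iff_eq, pvCanon_eq_iff q k hq]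
    constructor
    · rintro ⟨rfl | ⟨_, rfl⟩, hle⟩
      · exact absurd hq hle
      · rfl
    · rintro rfl
      refine ⟨Or.inr ⟨hlt, rfl⟩, ?_⟩
      have h1 : (pvRev q).1 = q.2 := rfl
      have h2 : (pvRev q).2 = q.1 := rfl
      omega
  · rw [if_neg hlt]
    have h0 : ps.countP (fun k => decide (pvCanon k = q ∧ ¬ k.1 ≤ k.2)) = 0 := by
      apply List.countP_eq_zero.2
      intro k _
      simp only [decide_eq_true_eq]
      rintro ⟨hc, hle⟩
      rcases (pvCanon_eq_iff q k hq).1 hc with rfl | ⟨h, _⟩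
      · exact hle hq
      · omega
    rw [h0]
    rfl

lemma pv_sum_counts_int (ps : List (Int × Int)) :
    ((PySem.Set.ofList ps).map (fun k => (ps.count k : Int))).sum = (ps.length : Int) := by
  have hnd : (PySem.Set.ofList ps).Nodup := PySem.Set.nodup_ofList ps
  have hsum_nat : ((PySem.Set.ofList ps).map (fun k => ps.count k)).sum = ps.length :=
    pv_sum_count _ hnd ps (fun x hx => (PySem.Set.mem_ofList ps x).2 hx)
  calc ((PySem.Set.ofList ps).map (fun k => (ps.count k : Int))).sum
      = (((PySem.Set.ofList ps).map (fun k => ps.count k)).map (fun n : Nat => (n : Int))).sum := by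
        rw [List.map_map]; rfl
    _ = ((((PySem.Set.ofList ps).map (fun k => ps.count k)).sum : Nat) : Int) :=
        (Nat.cast_list_sum _).symm
    _ = (ps.length : Int) := by rw [hsum_nat]

theorem pv_main (orders : List (List Int)) :
    find_order_size orders = find_order_size_alt orders := by
  rw [pvA_char]
  set ps := orders.map pvKeyA with hps
  have hB : find_order_size_alt orders =
      ((PySem.Set.ofList (ps.map pvCanon)).map
        (fun q => max (ps.count q : Int)
          (if q.1 < q.2 then (ps.count (pvRev q) : Int) else 0))).sum := by
    simp only [find_order_size_alt]
    have hfold : (orders.foldl (fun d order =>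
        let a := (PySem.List.pyGet? order 0).getD 0
        let b := (PySem.List.pyGet? order 1).getD 0
        if a ≤ b then
          let p := d.getD (a, b) (0, 0)
          d.insert (a, b) (p.1 + 1, p.2)
        else
          let p := d.getD (b, a) (0, 0)
          d.insert (b, a) (p.1, p.2 + 1)) PySem.Dict.empty)
        = ps.foldl pvStepB PySem.Dict.empty := by
      rw [hps, List.foldl_map]
      rfl
    rw [hfold, PySem.Dict.values_eq_map_keys _ (pvTally_nodup ps) (0, 0),
      pvTally_keys, List.map_map]
    apply pv_sum_map_congr
    intro q hq
    obtain ⟨k0, hk0ps, hk0⟩ := List.mem_map.1 ((PySem.Set.mem_ofList _ q).1 hq)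
    have hq12 : q.1 ≤ q.2 := hk0 ▸ pvCanon_fst_le k0
    show max ((ps.foldl pvStepB PySem.Dict.empty).getD q (0, 0)).1
        ((ps.foldl pvStepB PySem.Dict.empty).getD q (0, 0)).2 = _
    rw [pvTally_getD ps PySem.Dict.empty q]
    have he : (PySem.Dict.empty : PySem.Dict (Int × Int) (Int × Int)).getD q (0, 0) = (0, 0) :=
      rfl
    rw [he]
    show max (0 + _) (0 + _) = _
    rw [zero_add, zero_add, pv_countF ps q hq12, pv_countB ps q hq12]
  rw [hB, pv_sums_eq ps, pv_sum_map_sub, pv_sum_counts_int]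
  have hlen : ps.length = orders.length := by rw [hps, List.length_map]
  rw [hlen]

-- ===== VERDICT (by name: the statement is the Claim_ definition above) =====
theorem find_order_size_spec : Claim_equal_find_order_size := by
  intro orders _ _
  exact pv_main orders
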